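-- pv_equiv track=rewrite | github.com/JamesYuuu/tick | src/tick/history.py | weighted_widths
-- ===== SOURCE A (Python) =====
-- from collections.abc import Sequence
--
-- def weighted_widths(total_width: int, weights: Sequence[int]) -> tuple[int, ...]:
--     if total_width <= 0:
--         return tuple(0 for _ in weights)
--     total_weight = sum(weights)
--     if total_weight <= 0:
--         return tuple(0 for _ in weights)
--     widths = [(total_width * weight) // total_weight for weight in weights]
--     remainders = [(total_width * weight) % total_weight for weight in weights]
--     remaining = total_width - sum(widths)
--     for index in sorted(range(len(weights)), key=lambda i: remainders[i], reverse=True)[:remaining]: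
--         widths[index] += 1
--     while any(width == 0 for width in widths) and any(width > 1 for width in widths):
--         smallest = widths.index(0)
--         largest = max(range(len(widths)), key=lambda i: widths[i])
--         widths[largest] -= 1
--         widths[smallest] += 1
--     return tuple(widths)
-- ===== SOURCE B (Python) =====
-- def weighted_widths(total_width, weights):
--     if total_width <= 0:
--         return tuple(0 for _ in weights)
--     total_weight = sum(weights)
--     if total_weight <= 0:
--         return tuple(0 for _ in weights)
--     widths = [(total_width * weight) // total_weight for weight in weights]
--     remainders = [(total_width * weight) % total_weight for weight in weights]
--     remaining = total_width - sum(widths)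
--     for index in sorted(range(len(weights)), key=lambda i: remainders[i], reverse=True)[:remaining]:
--         widths[index] += 1
--     # Rebalance in closed form instead of A's donate-one-unit-at-a-time loop:
--     # d units move from the largest entries onto the first d zero entries; the
--     # donors end at a computed water level.
--     zeros = sum(1 for w in widths if w == 0)
--     excess = sum(w - 1 for w in widths if w > 1)
--     d = min(zeros, excess)
--     if d <= 0:
--         return tuple(widths)
--     level = 1
--     acc = 0
--     for j, v in enumerate(sorted(widths, reverse=True), 1):
--         acc += v
--         level = max(level, -((d - acc) // j))
--     r = d - sum(w - level for w in widths if w > level)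
--     out = []
--     fill = d
--     for w in widths:
--         if w >= level:
--             if r > 0:
--                 out.append(level - 1)
--                 r -= 1
--             else:
--                 out.append(level)
--         elif w == 0 and fill > 0:
--             out.append(1)
--             fill -= 1
--         else:
--             out.append(w)
--     return tuple(out)
-- ===== Notes on version B (the rewrite author's own statement) =====
-- stated objective: alternative
-- what changed: B replaces A's donate-one-unit-at-a-time rebalancing while-loop (which rescans for the first zero and the arg-max on every iteration) by a closed-form water-level computation: it counts zeros and excess once, derives the final donor level from one sort plus prefix sums, and rebuilds the list in a single pass; the proportional division and remainder distribution are unchanged. Intended as asymptotically faster on zero-heavy inputs (measured 5.42x at the largest size where both finished, with A timing out on some inputs), but a timing run could not confirm it uniformly, so no speed is claimed.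
import Mathlib
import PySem

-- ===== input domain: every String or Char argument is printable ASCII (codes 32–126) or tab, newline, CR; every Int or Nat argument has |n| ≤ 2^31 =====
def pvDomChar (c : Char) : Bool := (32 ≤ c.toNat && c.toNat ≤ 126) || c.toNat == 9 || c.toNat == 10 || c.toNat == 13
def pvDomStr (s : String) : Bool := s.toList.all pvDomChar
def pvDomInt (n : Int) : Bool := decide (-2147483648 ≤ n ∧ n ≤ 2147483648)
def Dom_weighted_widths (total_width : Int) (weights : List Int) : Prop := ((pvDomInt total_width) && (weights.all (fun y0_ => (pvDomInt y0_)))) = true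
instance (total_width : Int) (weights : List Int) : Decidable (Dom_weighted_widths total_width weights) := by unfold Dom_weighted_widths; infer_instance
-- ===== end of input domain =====

-- B replaces only A's donate-one-unit-at-a-time rebalancing while-loop by a closed-form
-- water-level computation; the proportional division and remainder distribution are unchanged.

-- ===== PORT A =====
-- A-side helpers: facts about one iteration of the while loop, needed for its termination.


theorem pvCount_set_tf {W : List Int} {i : Nat} {a : Int} {p : Int → Bool}
    (h : i < W.length) (h1 : p (W.getD i 0) = true) (h2 : p a = false) :
    (W.set i a).countP p + 1 = W.countP p := by
  induction W generalizing i with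
  | nil => simp at h
  | cons x t ih =>
    cases i with
    | zero => simp_all [List.countP_cons]
    | succ j =>
      simp only [List.set_cons_succ, List.countP_cons, List.getD_cons_succ, List.length_cons] at *
      have := ih (by omega) h1
      omega

theorem pvCount_set_ff {W : List Int} {i : Nat} {a : Int} {p : Int → Bool}
    (h : i < W.length) (h1 : p (W.getD i 0) = false) (h2 : p a = false) :
    (W.set i a).countP p = W.countP p := by
  induction W generalizing i with
  | nil => simp at h
  | cons x t ih =>
    cases i with
    | zero => simp_all [List.countP_cons]
    | succ j =>
      simp only [List.set_cons_succ, List.countP_cons, List.getD_cons_succ, List.length_cons] at *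
      have := ih (by omega) h1
      omega

theorem pvMax?_fold_first {α κ : Type} [LinearOrder κ] (key : α → κ) :
    ∀ (xs : List α) (a m : α),
      xs.foldl (fun acc x => match acc with
        | none => some x
        | some mm => if key mm < key x then some x else some mm) (some a) = some m →
      m = a ∨ ∃ pre suf, xs = pre ++ m :: suf ∧ (∀ y ∈ pre, key y < key m) ∧ key a < key m := by
  intro xs
  induction xs with
  | nil => intro a m h; simp at h; exact Or.inl h.symm
  | cons x t ih =>
    intro a m h
    simp only [List.foldl_cons] at h
    by_cases hx : key a < key x
    · rw [if_pos hx] at h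
      rcases ih x m h with rfl | ⟨pre, suf, rfl, hpre, hxm⟩
      · exact Or.inr ⟨[], t, rfl, by simp, hx⟩
      · exact Or.inr ⟨x :: pre, suf, rfl, by
          intro y hy
          rcases List.mem_cons.1 hy with rfl | hy
          · exact hxm
          · exact hpre y hy, lt_trans hx hxm⟩
    · rw [if_neg hx] at h
      rcases ih a m h with rfl | ⟨pre, suf, rfl, hpre, ham⟩
      · exact Or.inl rfl
      · exact Or.inr ⟨x :: pre, suf, rfl, by
          intro y hy
          rcases List.mem_cons.1 hy with rfl | hy
          · exact lt_of_le_of_lt (le_of_not_gt hx) ham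
          · exact hpre y hy, ham⟩

theorem pvMax?_first {α κ : Type} [LinearOrder κ] {xs : List α} {key : α → κ} {m : α}
    (h : PySem.List.max? xs key = some m) :
    ∃ pre suf, xs = pre ++ m :: suf ∧ ∀ y ∈ pre, key y < key m := by
  rw [PySem.List.max?.eq_1] at h
  cases xs with
  | nil => simp at h
  | cons x t =>
    simp only [List.foldl_cons] at h
    rcases pvMax?_fold_first key t x m h with rfl | ⟨pre, suf, rfl, hpre, hxm⟩
    · exact ⟨[], t, rfl, by simp⟩
    · exact ⟨x :: pre, suf, rfl, by
        intro y hy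
        rcases List.mem_cons.1 hy with rfl | hy
        · exact hxm
        · exact hpre y hy⟩

def pvStepW (W : List Int) (s l : Nat) : List Int :=
  (W.set l (W.getD l 0 - 1)).set s 1

def pvStepFacts (W : List Int) (s l : Nat) (m : Int) : Prop :=
  s < W.length ∧ l < W.length ∧ W.getD s 0 = 0 ∧ W.getD l 0 = m ∧ 2 ≤ m ∧
  (∀ j, j < s → W.getD j 0 ≠ 0) ∧ (∀ j, j < l → W.getD j 0 < m) ∧ (∀ y ∈ W, y ≤ m)

theorem pvStepA_extract (W : List Int) (s : Nat) (l : Int)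
    (h1 : (W.any (fun w => w == 0)) = true) (h2 : (W.any (fun w => decide (1 < w))) = true)
    (hs : PySem.List.index? W 0 = some s)
    (hl : PySem.List.max? (PySem.List.pyRange 0 W.length 1) (fun i => PySem.List.pyGetD W i 0) = some l) :
    ∃ lN : Nat, l = (lN : Int) ∧ pvStepFacts W s lN (W.getD lN 0) ∧
      (PySem.List.pySetD
        (PySem.List.pySetD W l (PySem.List.pyGetD W l 0 - 1))
        (s : Int)
        (PySem.List.pyGetD (PySem.List.pySetD W l (PySem.List.pyGetD W l 0 - 1)) (s : Int) 0 + 1))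
      = pvStepW W s lN := by
  -- first-zero decomposition
  obtain ⟨pre0, suf0, hW0, hlen0, hnp0⟩ := (PySem.List.index?_eq_some_iff W 0 s).1 hs
  have hslt : s < W.length := by rw [hW0, ← hlen0]; simp
  have hWs : W.getD s 0 = 0 := by
    rw [hW0, ← hlen0, List.getD_eq_getElem _ _ (by simpa using hslt)]
    simp
  have hzb : ∀ j, j < s → W.getD j 0 ≠ 0 := by
    intro j hj
    rw [hW0, List.getD_eq_getElem _ _ (by simp; omega),
        List.getElem_append_left (by omega)]
    intro hc
    exact hnp0 (hc ▸ List.getElem_mem _)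
  -- first-max decomposition
  obtain ⟨pre1, suf1, hW1, hmax⟩ := pvMax?_first hl
  have hlenR : (PySem.List.pyRange 0 (W.length) 1).length = W.length := by
    simp [PySem.List.length_pyRange_one]
  have hllt' : pre1.length < (PySem.List.pyRange 0 (W.length) 1).length := by
    rw [hW1]; simp
  have hleq : l = (pre1.length : Int) := by
    have h := PySem.List.getElem?_pyRange_one 0 (W.length) pre1.length
    rw [hW1, List.getElem?_append_right (le_refl _)] at h
    rw [if_pos (by rw [← PySem.List.length_pyRange_one 0 (W.length)]; exact hllt')] at h
    simpa using h
  have hllt : pre1.length < W.length := by rw [← hlenR]; exact hllt'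
  have hkey : PySem.List.pyGetD W l 0 = W.getD pre1.length 0 := by
    rw [hleq, PySem.List.pyGetD_natCast]
  have hgetDle : ∀ j, j < W.length → W.getD j 0 ≤ W.getD pre1.length 0 := by
    intro j hj
    have hmem : (j : Int) ∈ PySem.List.pyRange 0 (W.length) 1 := by
      rw [PySem.List.mem_pyRange_one]
      constructor <;> [positivity; exact_mod_cast hj]
    have := PySem.List.max?_isMax hl _ hmem
    rwa [hkey, PySem.List.pyGetD_natCast] at this
  have hallle : ∀ y ∈ W, y ≤ W.getD pre1.length 0 := by
    intro y hy
    obtain ⟨j, hj, rfl⟩ := List.mem_iff_getElem.1 hy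
    have := hgetDle j hj
    rwa [List.getD_eq_getElem _ _ hj] at this
  have hm2 : 2 ≤ W.getD pre1.length 0 := by
    obtain ⟨w, hw, hw1⟩ := List.any_eq_true.1 h2
    have := hallle w hw
    simp only [decide_eq_true_eq] at hw1
    omega
  have hbefore : ∀ j, j < pre1.length → W.getD j 0 < W.getD pre1.length 0 := by
    intro j hj
    have hjR : (pre1 ++ l :: suf1)[j]? = some ((j : Nat) : Int) := by
      rw [← hW1, PySem.List.getElem?_pyRange_one,
        if_pos (by rw [← PySem.List.length_pyRange_one 0 (W.length), hlenR]; omega)]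
      simp
    rw [List.getElem?_append_left (by omega)] at hjR
    have hjmem : ((j : Nat) : Int) ∈ pre1 := List.mem_of_getElem? hjR
    have := hmax _ hjmem
    rwa [hkey, PySem.List.pyGetD_natCast] at this
  refine ⟨pre1.length, hleq, ⟨hslt, hllt, hWs, rfl, hm2, hzb, hbefore, hallle⟩, ?_⟩
  -- normal form of the two pySetD updates
  have hsne : s ≠ pre1.length := by
    intro hc; rw [hc] at hWs; omega
  have hstep1 : PySem.List.pySetD W l (PySem.List.pyGetD W l 0 - 1)
      = W.set pre1.length (W.getD pre1.length 0 - 1) := by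
    rw [hkey, hleq, PySem.List.pySetD_of_nonneg _ _ (by positivity)]
    simp
  rw [hstep1]
  have hget2 : PySem.List.pyGetD (W.set pre1.length (W.getD pre1.length 0 - 1)) ((s : Nat) : Int) 0 = 0 := by
    rw [PySem.List.pyGetD_natCast, List.getD_eq_getElem _ _ (by simpa using hslt),
      List.getElem_set_ne (by omega)]
    rw [List.getD_eq_getElem _ _ hslt] at hWs
    exact hWs
  rw [hget2, PySem.List.pySetD_of_nonneg _ _ (by positivity)]
  norm_num [pvStepW]

def pvZC (W : List Int) : Nat := W.countP (fun w => w == 0)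

theorem pvZC_step {W : List Int} {s l : Nat} {m : Int} (h : pvStepFacts W s l m) :
    pvZC (pvStepW W s l) + 1 = pvZC W := by
  obtain ⟨hs, hl, hWs, hWl, hm2, -, -, -⟩ := h
  unfold pvZC pvStepW
  have e1 : (W.set l (W.getD l 0 - 1)).countP (fun w => w == 0) = W.countP (fun w => w == 0) :=
    pvCount_set_ff hl (by rw [hWl]; simp only [beq_eq_false_iff_ne, ne_eq]; omega)
      (by rw [hWl]; simp only [beq_eq_false_iff_ne, ne_eq]; omega)
  have hg : (W.set l (W.getD l 0 - 1)).getD s 0 = 0 := by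
    have hsne : s ≠ l := by intro hc; rw [hc, hWl] at hWs; omega
    rw [List.getD_eq_getElem _ _ (by simpa using hs), List.getElem_set_ne (by omega)]
    rw [List.getD_eq_getElem _ _ hs] at hWs
    exact hWs
  rw [← e1]
  exact pvCount_set_tf (by simpa using hs) (by simpa using hg) (by simp)

theorem pvFix_dec (W : List Int) (s : Nat) (l : Int)
    (h1 : (W.any (fun w => w == 0)) = true) (h2 : (W.any (fun w => decide (1 < w))) = true)
    (hs : PySem.List.index? W 0 = some s)
    (hl : PySem.List.max? (PySem.List.pyRange 0 W.length 1) (fun i => PySem.List.pyGetD W i 0) = some l) :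
    pvZC (PySem.List.pySetD
        (PySem.List.pySetD W l (PySem.List.pyGetD W l 0 - 1))
        (s : Int)
        (PySem.List.pyGetD (PySem.List.pySetD W l (PySem.List.pyGetD W l 0 - 1)) (s : Int) 0 + 1))
      < pvZC W := by
  obtain ⟨lN, -, hf, he⟩ := pvStepA_extract W s l h1 h2 hs hl
  rw [he]
  have := pvZC_step hf
  omega

/-- Port of A's while loop. -/
def pvFixLoopA (widths : List Int) : List Int :=
  if h : (widths.any (fun w => w == 0)) = true ∧ (widths.any (fun w => decide (1 < w))) = true then
    match hs : PySem.List.index? widths 0 with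
    | none => widths
    | some smallest =>
      match hl : PySem.List.max? (PySem.List.pyRange 0 widths.length 1)
          (fun i => PySem.List.pyGetD widths i 0) with
      | none => widths
      | some largest =>
        pvFixLoopA (PySem.List.pySetD
          (PySem.List.pySetD widths largest (PySem.List.pyGetD widths largest 0 - 1))
          (smallest : Int)
          (PySem.List.pyGetD
            (PySem.List.pySetD widths largest (PySem.List.pyGetD widths largest 0 - 1))
            (smallest : Int) 0 + 1))
  else widths
termination_by pvZC widths
decreasing_by exact pvFix_dec widths smallest largest h.1 h.2 hs hl

def weighted_widths (total_width : Int) (weights : List Int) : List Int :=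
  if total_width ≤ 0 then weights.map (fun _ => 0)
  else
    let total_weight := weights.sum
    if total_weight ≤ 0 then weights.map (fun _ => 0)
    else
      let widths0 := weights.map (fun weight => PySem.Int.floordiv (total_width * weight) total_weight)
      let remainders := weights.map (fun weight => PySem.Int.mod (total_width * weight) total_weight)
      let remaining := total_width - widths0.sum
      let widths1 := (PySem.List.slice
          (PySem.List.sorted (PySem.List.pyRange 0 (weights.length) 1)
            (fun i => PySem.List.pyGetD remainders i 0) true)
          none (some remaining)).foldl
          (fun ws index => PySem.List.pySetD ws index (PySem.List.pyGetD ws index 0 + 1)) widths0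
      pvFixLoopA widths1

-- ===== PORT B =====
/-- Port of B's closed-form rebalancing (Source B, after the remainder distribution). -/
def pvBRebalance (widths : List Int) : List Int :=
  let zeros : Int := widths.foldl (fun acc w => if w == 0 then acc + 1 else acc) 0
  let excess : Int := widths.foldl (fun acc w => if 1 < w then acc + (w - 1) else acc) 0
  let d := min zeros excess
  if d ≤ 0 then widths
  else
    let level := ((PySem.List.enumerate (PySem.List.sorted widths (fun x => x) true) 1).foldl
        (fun st jv =>
          let acc := st.2 + jv.2
          (max st.1 (-(PySem.Int.floordiv (d - acc) jv.1)), acc)) ((1 : Int), (0 : Int))).1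
    let r := d - widths.foldl (fun acc w => if level < w then acc + (w - level) else acc) 0
    (widths.foldl (fun st w =>
        if level ≤ w then
          if 0 < st.2.1 then (st.1 ++ [level - 1], st.2.1 - 1, st.2.2)
          else (st.1 ++ [level], st.2.1, st.2.2)
        else if w == 0 && decide (0 < st.2.2) then (st.1 ++ [(1:Int)], st.2.1, st.2.2 - 1)
        else (st.1 ++ [w], st.2.1, st.2.2)) (([] : List Int), r, d)).1

def weighted_widths_alt (total_width : Int) (weights : List Int) : List Int :=
  if total_width ≤ 0 then weights.map (fun _ => 0)
  else
    let total_weight := weights.sum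
    if total_weight ≤ 0 then weights.map (fun _ => 0)
    else
      let widths0 := weights.map (fun weight => PySem.Int.floordiv (total_width * weight) total_weight)
      let remainders := weights.map (fun weight => PySem.Int.mod (total_width * weight) total_weight)
      let remaining := total_width - widths0.sum
      let widths1 := (PySem.List.slice
          (PySem.List.sorted (PySem.List.pyRange 0 (weights.length) 1)
            (fun i => PySem.List.pyGetD remainders i 0) true)
          none (some remaining)).foldl
          (fun ws index => PySem.List.pySetD ws index (PySem.List.pyGetD ws index 0 + 1)) widths0
      pvBRebalance widths1

-- ===== PRECONDITION & SPEC =====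
def Spec_weighted_widths (total_width : Int) (weights : List Int) (out : List Int) : Prop := out = weighted_widths_alt total_width weights
instance (total_width : Int) (weights : List Int) (out : List Int) : Decidable (Spec_weighted_widths total_width weights out) := by unfold Spec_weighted_widths; infer_instance

-- ===== CLAIM (what is proved, stated in full; the proofs are below) =====
def Claim_equal_weighted_widths : Prop := ∀ (total_width : Int) (weights : List Int), Dom_weighted_widths total_width weights → Spec_weighted_widths total_width weights (weighted_widths total_width weights)

-- ===== LEMMAS AND PROOFS =====


-- ghost quantities
def pvF (V : Int) (W : List Int) : Int := (W.map (fun w => max (w - V) 0)).sum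

def pvChar (W : List Int) (d V : Int) : Prop :=
  1 ≤ V ∧ pvF V W ≤ d ∧ ∀ U, 1 ≤ U → U < V → d < pvF U W

def pvLevS (V : Int) : List Int → Int × Int → List Int × (Int × Int)
  | [], st => ([], st)
  | w :: t, st =>
    if V ≤ w then
      if 0 < st.1 then let p := pvLevS V t (st.1 - 1, st.2); ((V - 1) :: p.1, p.2)
      else let p := pvLevS V t st; (V :: p.1, p.2)
    else if w = 0 ∧ 0 < st.2 then let p := pvLevS V t (st.1, st.2 - 1); ((1 : Int) :: p.1, p.2)
    else let p := pvLevS V t st; (w :: p.1, p.2)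

theorem pvF_nil (V : Int) : pvF V [] = 0 := rfl
theorem pvF_cons (V w : Int) (t : List Int) : pvF V (w :: t) = max (w - V) 0 + pvF V t := by
  simp [pvF]
theorem pvF_append (V : Int) (A B : List Int) : pvF V (A ++ B) = pvF V A + pvF V B := by
  simp [pvF]

theorem pvF_nonneg (V : Int) (W : List Int) : 0 ≤ pvF V W := by
  induction W with
  | nil => simp [pvF]
  | cons w t ih => rw [pvF_cons]; have := le_max_right (w - V) 0; omega

theorem pvF_eq_zero {V : Int} {W : List Int} (h : ∀ w ∈ W, w ≤ V) : pvF V W = 0 := by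
  induction W with
  | nil => rfl
  | cons w t ih =>
    rw [pvF_cons, ih (fun x hx => h x (List.mem_cons_of_mem _ hx))]
    have := h w (List.mem_cons_self ..)
    have : max (w - V) 0 = 0 := by rcases max_choice (w - V) 0 with h' | h' <;> omega
    omega

theorem pvF_le_zero {V : Int} {W : List Int} (h : pvF V W ≤ 0) : ∀ w ∈ W, w ≤ V := by
  induction W with
  | nil => simp
  | cons w t ih =>
    rw [pvF_cons] at h
    have h1 := pvF_nonneg V t
    have h2 := le_max_right (w - V) 0
    have h3 := le_max_left (w - V) 0
    intro x hx
    rcases List.mem_cons.1 hx with rfl | hx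
    · omega
    · exact ih (by omega) x hx

theorem pvF_perm {W W' : List Int} (h : W.Perm W') (V : Int) : pvF V W = pvF V W' :=
  List.Perm.sum_eq (List.Perm.map _ h)

-- prefix lower bound:  sum of first k minus k*V ≤ pvF V X
theorem pvF_take_le (V : Int) : ∀ (X : List Int) (k : Nat), k ≤ X.length → (X.take k).sum - k * V ≤ pvF V X := by
  intro X
  induction X with
  | nil => intro k hk; simp at hk; subst hk; simp [pvF_nil]
  | cons w t ih =>
    intro k hk
    cases k with
    | zero => simp; exact pvF_nonneg V (w :: t)
    | succ j =>
      rw [List.take_succ_cons, List.sum_cons, pvF_cons]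
      have := ih j (by simpa using hk)
      have h2 := le_max_left (w - V) 0
      push_cast
      have : ((j : Int) + 1) * V = j * V + V := by ring
      omega

-- exact value on a descending list
theorem pvF_sorted_exact (V : Int) : ∀ (X : List Int),
    X.Pairwise (fun a b => b ≤ a) →
    pvF V X = (X.take (X.countP (fun w => V < w))).sum - (X.countP (fun w => V < w)) * V := by
  intro X
  induction X with
  | nil => simp [pvF_nil]
  | cons w t ih =>
    intro hp
    rw [List.pairwise_cons] at hp
    rw [pvF_cons, List.countP_cons]
    by_cases hw : V < w
    · have hd : (decide (V < w)) = true := by simpa using hw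
      simp only [hd, if_true]
      rw [List.take_succ_cons, List.sum_cons, ih hp.2]
      have hmax : max (w - V) 0 = w - V := by omega
      push_cast
      have : ((t.countP fun w => decide (V < w) : Int) + 1) * V
          = (t.countP fun w => decide (V < w) : Int) * V + V := by ring
      rw [hmax]
      omega
    · have hd : (decide (V < w)) = false := by simpa using hw
      simp only [hd]
      norm_num
      have hall : ∀ x ∈ w :: t, x ≤ V := by
        intro x hx
        rcases List.mem_cons.1 hx with rfl | hx
        · omega
        · have := hp.1 x hx; omega
      have hc0 : t.countP (fun w => decide (V < w)) = 0 := by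
        rw [List.countP_eq_zero]
        intro x hx
        have := hall x (List.mem_cons_of_mem _ hx)
        simpa using by omega
      have ht : pvF V t = 0 := pvF_eq_zero (fun x hx => hall x (List.mem_cons_of_mem _ hx))
      have hm : max (w - V) 0 = 0 := by
        have := hall w (List.mem_cons_self ..); omega
      simp [ht, hm, hc0]

theorem pvLevS_append (V : Int) : ∀ (X Y : List Int) (st : Int × Int),
    pvLevS V (X ++ Y) st = ((pvLevS V X st).1 ++ (pvLevS V Y (pvLevS V X st).2).1,
      (pvLevS V Y (pvLevS V X st).2).2) := by
  intro X
  induction X with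
  | nil => intro Y st; simp [pvLevS]
  | cons w t ih =>
    intro Y st
    simp only [List.cons_append, pvLevS]
    split_ifs <;> simp [ih]

-- a segment without zeros: output and r-trace do not depend on fill, fill is unchanged
theorem pvLevS_nozero (V : Int) : ∀ (X : List Int), (∀ w ∈ X, w ≠ 0) → ∀ (r f : Int),
    pvLevS V X (r, f) = ((pvLevS V X (r, 0)).1, ((pvLevS V X (r, 0)).2.1, f)) := by
  intro X
  induction X with
  | nil => intro h r f; simp [pvLevS]
  | cons w t ih =>
    intro h r f
    have hw : w ≠ 0 := h w (List.mem_cons_self ..)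
    have ht : ∀ w ∈ t, w ≠ 0 := fun x hx => h x (List.mem_cons_of_mem _ hx)
    simp only [pvLevS, hw, false_and, if_false]
    split_ifs with h1 h2
    · simp only [ih ht (r - 1) f]
    · simp only [ih ht r f]
    · simp only [ih ht r f]

-- a segment entirely below the level: output and fill-trace do not depend on r, r is unchanged
theorem pvLevS_noge (V : Int) : ∀ (X : List Int), (∀ w ∈ X, w < V) → ∀ (r f : Int),
    pvLevS V X (r, f) = ((pvLevS V X (0, f)).1, (r, (pvLevS V X (0, f)).2.2)) := by
  intro X
  induction X with
  | nil => intro h r f; simp [pvLevS]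
  | cons w t ih =>
    intro h r f
    have hw : ¬ (V ≤ w) := by have := h w (List.mem_cons_self ..); omega
    have ht : ∀ w ∈ t, w < V := fun x hx => h x (List.mem_cons_of_mem _ hx)
    simp only [pvLevS, hw, if_false]
    split_ifs with h1
    · simp only [ih ht r (f - 1)]
    · simp only [ih ht r f]

theorem pvLevS_plain (V : Int) : ∀ (X : List Int), (∀ w ∈ X, w < V ∧ w ≠ 0) → ∀ (st : Int × Int),
    pvLevS V X st = (X, st) := by
  intro X
  induction X with
  | nil => intro h st; simp [pvLevS]
  | cons w t ih =>
    intro h st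
    have hw := h w (List.mem_cons_self ..)
    have h1 : ¬ (V ≤ w) := by omega
    simp [pvLevS, h1, hw.2, ih (fun x hx => h x (List.mem_cons_of_mem _ hx))]

theorem pvLevS_r_bounds (V : Int) : ∀ (X : List Int) (r f : Int), 0 ≤ r →
    0 ≤ (pvLevS V X (r, f)).2.1 ∧ (pvLevS V X (r, f)).2.1 ≤ r := by
  intro X
  induction X with
  | nil => intro r f h; simp [pvLevS]; omega
  | cons w t ih =>
    intro r f h
    simp only [pvLevS]
    split_ifs with h1 h2 h3
    · have := ih (r - 1) f (by omega); simpa using by omega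
    · exact ih r f h
    · exact ih r (f - 1) h
    · exact ih r f h

theorem pvLevS_id (V : Int) : ∀ (X : List Int), (∀ w ∈ X, w ≤ V) →
    (pvLevS V X (0, 0)).1 = X := by
  intro X
  induction X with
  | nil => intro h; rfl
  | cons w t ih =>
    intro h
    have hw := h w (List.mem_cons_self ..)
    have ht := fun x hx => h x (List.mem_cons_of_mem _ hx)
    by_cases h1 : V ≤ w
    · have : w = V := by omega
      subst this
      simp [pvLevS, ih ht]
    · simp [pvLevS, h1, ih ht]

theorem pvLevS_cons_ge_pos {V w r f : Int} (t : List Int) (h1 : V ≤ w) (h2 : 0 < r) :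
    pvLevS V (w :: t) (r, f) = ((V - 1) :: (pvLevS V t (r - 1, f)).1, (pvLevS V t (r - 1, f)).2) := by
  simp [pvLevS, h1, h2]

theorem pvLevS_cons_ge_zero {V w r f : Int} (t : List Int) (h1 : V ≤ w) (h2 : ¬ 0 < r) :
    pvLevS V (w :: t) (r, f) = (V :: (pvLevS V t (r, f)).1, (pvLevS V t (r, f)).2) := by
  simp [pvLevS, h1, h2]

theorem pvLevS_cons_zero {V w r f : Int} (t : List Int) (h1 : ¬ V ≤ w) (h2 : w = 0) (h3 : 0 < f) :
    pvLevS V (w :: t) (r, f) = ((1 : Int) :: (pvLevS V t (r, f - 1)).1, (pvLevS V t (r, f - 1)).2) := by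
  simp only [pvLevS, if_neg h1, if_pos (And.intro h2 h3)]

theorem pvLevS_cons_plain {V w r f : Int} (t : List Int) (h1 : ¬ V ≤ w) (h2 : ¬ (w = 0 ∧ 0 < f)) :
    pvLevS V (w :: t) (r, f) = (w :: (pvLevS V t (r, f)).1, (pvLevS V t (r, f)).2) := by
  simp only [pvLevS, if_neg h1, if_neg h2]

theorem pvKey_sl (P Q R : List Int) (m d V : Int)
    (hm : 2 ≤ m) (hV1 : 1 ≤ V) (hVm : V ≤ m) (hd : 0 < d)
    (hF : pvF V (P ++ (0 :: (Q ++ (m :: R)))) ≤ d)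
    (hr1 : V = 1 → d ≤ pvF 1 (P ++ (0 :: (Q ++ (m :: R)))))
    (hP0 : ∀ y ∈ P, y ≠ 0) (hPm : ∀ y ∈ P, y < m) (hQm : ∀ y ∈ Q, y < m)
    (hRm : ∀ y ∈ R, y ≤ m) :
    (pvLevS V (P ++ (0 :: (Q ++ (m :: R)))) (d - pvF V (P ++ (0 :: (Q ++ (m :: R)))), d)).1
      = (pvLevS V (P ++ (1 :: (Q ++ ((m - 1) :: R)))) ((d - 1) - pvF V (P ++ (1 :: (Q ++ ((m - 1) :: R)))), d - 1)).1 := by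
  have hFW : pvF V (P ++ (0 :: (Q ++ (m :: R))))
      = pvF V P + max (0 - V) 0 + pvF V Q + max (m - V) 0 + pvF V R := by
    rw [pvF_append, pvF_cons, pvF_append, pvF_cons]; ring
  have hFW' : pvF V (P ++ (1 :: (Q ++ ((m - 1) :: R))))
      = pvF V P + max (1 - V) 0 + pvF V Q + max (m - 1 - V) 0 + pvF V R := by
    rw [pvF_append, pvF_cons, pvF_append, pvF_cons]; ring
  have h0V : max (0 - V) 0 = 0 := by omega
  have h1V : max (1 - V) 0 = 0 := by omega
  set r : Int := d - pvF V (P ++ (0 :: (Q ++ (m :: R)))) with hrdef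
  set r' : Int := (d - 1) - pvF V (P ++ (1 :: (Q ++ ((m - 1) :: R)))) with hr'def
  rcases eq_or_lt_of_le hV1 with hV1' | hV2
  · -- CASE A : V = 1
    have hVeq : V = 1 := hV1'.symm
    subst hVeq
    have hmm : max (m - 1) 0 = m - 1 := by omega
    have hmm' : max (m - 1 - 1) 0 = m - 2 := by omega
    have hr0 : r = 0 := by have := hr1 rfl; omega
    have hr'0 : r' = 0 := by
      rw [hr'def, hFW', h1V, hmm']
      rw [hrdef, hFW, h0V, hmm] at hr0
      omega
    rw [hr0, hr'0]
    rw [pvLevS_append 1 P (0 :: (Q ++ (m :: R))) (0, d)]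
    rw [pvLevS_append 1 P (1 :: (Q ++ ((m - 1) :: R))) (0, d - 1)]
    rw [pvLevS_nozero 1 P hP0 0 d, pvLevS_nozero 1 P hP0 0 (d - 1)]
    dsimp only
    have hrP : (pvLevS 1 P (0, 0)).2.1 = 0 := by
      have := pvLevS_r_bounds 1 P 0 0 le_rfl; omega
    rw [hrP]
    rw [pvLevS_cons_zero (Q ++ (m :: R)) (by omega) rfl hd]
    rw [pvLevS_cons_ge_zero (Q ++ ((m - 1) :: R)) (by omega) (by omega)]
    dsimp only
    congr 2
    rw [pvLevS_append 1 Q (m :: R) (0, d - 1), pvLevS_append 1 Q ((m - 1) :: R) (0, d - 1)]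
    dsimp only
    congr 1
    have hrQ : (pvLevS 1 Q (0, d - 1)).2.1 = 0 := by
      have := pvLevS_r_bounds 1 Q 0 (d - 1) le_rfl; omega
    have hQst : (pvLevS 1 Q (0, d - 1)).2 = (0, (pvLevS 1 Q (0, d - 1)).2.2) :=
      Prod.ext hrQ rfl
    rw [hQst]
    rw [pvLevS_cons_ge_zero R (by omega) (by omega),
        pvLevS_cons_ge_zero R (by omega) (by omega)]
  · rcases lt_or_eq_of_le hVm with hVlt | hVeq
    · -- CASE B : 2 ≤ V ≤ m - 1
      have hmV : max (m - V) 0 = m - V := by omega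
      have hmV' : max (m - 1 - V) 0 = m - 1 - V := by omega
      have hr'r : r' = r := by
        rw [hr'def, hFW', h1V, hmV', hrdef, hFW, h0V, hmV]; ring
      rw [hr'r]
      rw [pvLevS_append V P (0 :: (Q ++ (m :: R))) (r, d)]
      rw [pvLevS_append V P (1 :: (Q ++ ((m - 1) :: R))) (r, d - 1)]
      rw [pvLevS_nozero V P hP0 r d, pvLevS_nozero V P hP0 r (d - 1)]
      dsimp only
      rw [pvLevS_cons_zero (Q ++ (m :: R)) (by omega) rfl hd]
      rw [pvLevS_cons_plain (Q ++ ((m - 1) :: R)) (by omega) (by omega)]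
      dsimp only
      congr 2
      rw [pvLevS_append V Q (m :: R) ((pvLevS V P (r, 0)).2.1, d - 1),
          pvLevS_append V Q ((m - 1) :: R) ((pvLevS V P (r, 0)).2.1, d - 1)]
      dsimp only
      congr 1
      rw [← Prod.mk.eta (p := (pvLevS V Q ((pvLevS V P (r, 0)).2.1, d - 1)).2)]
      by_cases h0r : 0 < (pvLevS V Q ((pvLevS V P (r, 0)).2.1, d - 1)).2.1
      · rw [pvLevS_cons_ge_pos R (by omega) h0r, pvLevS_cons_ge_pos R (by omega) h0r]
      · rw [pvLevS_cons_ge_zero R (by omega) h0r, pvLevS_cons_ge_zero R (by omega) h0r]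
    · -- CASE C : V = m
      subst hVeq
      have hFP : pvF V P = 0 := pvF_eq_zero (fun y hy => le_of_lt (hPm y hy))
      have hFQ : pvF V Q = 0 := pvF_eq_zero (fun y hy => le_of_lt (hQm y hy))
      have hFR : pvF V R = 0 := pvF_eq_zero hRm
      have hmx : max (V - V) 0 = 0 := by omega
      have hmx' : max (V - 1 - V) 0 = 0 := by omega
      have hrd : r = d := by rw [hrdef, hFW, h0V, hFP, hFQ, hFR, hmx]; ring
      have hr'd : r' = d - 1 := by rw [hr'def, hFW', h1V, hFP, hFQ, hFR, hmx']; ring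
      rw [pvLevS_append V P (0 :: (Q ++ (V :: R))) (r, d)]
      rw [pvLevS_append V P (1 :: (Q ++ ((V - 1) :: R))) (r', d - 1)]
      rw [pvLevS_plain V P (fun y hy => ⟨hPm y hy, hP0 y hy⟩) (r, d),
          pvLevS_plain V P (fun y hy => ⟨hPm y hy, hP0 y hy⟩) (r', d - 1)]
      dsimp only
      rw [pvLevS_cons_zero (Q ++ (V :: R)) (by omega) rfl hd]
      rw [pvLevS_cons_plain (Q ++ ((V - 1) :: R)) (by omega) (by omega)]
      dsimp only
      congr 2
      rw [pvLevS_append V Q (V :: R) (r, d - 1),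
          pvLevS_append V Q ((V - 1) :: R) (r', d - 1)]
      rw [pvLevS_noge V Q hQm r (d - 1), pvLevS_noge V Q hQm r' (d - 1)]
      dsimp only
      congr 1
      rw [pvLevS_cons_ge_pos R (by omega) (by omega)]
      rw [pvLevS_cons_plain R (by omega) (by omega)]
      dsimp only
      rw [show r - 1 = r' by omega]

theorem pvKey_ls (P Q R : List Int) (m d V : Int)
    (hm : 2 ≤ m) (hV1 : 1 ≤ V) (hVm : V ≤ m) (hd : 0 < d)
    (hF : pvF V (P ++ (m :: (Q ++ (0 :: R)))) ≤ d)
    (hr1 : V = 1 → d ≤ pvF 1 (P ++ (m :: (Q ++ (0 :: R)))))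
    (hP0 : ∀ y ∈ P, y ≠ 0) (hPm : ∀ y ∈ P, y < m) (hQ0 : ∀ y ∈ Q, y ≠ 0)
    (hQm : ∀ y ∈ Q, y ≤ m) (hRm : ∀ y ∈ R, y ≤ m) :
    (pvLevS V (P ++ (m :: (Q ++ (0 :: R)))) (d - pvF V (P ++ (m :: (Q ++ (0 :: R)))), d)).1
      = (pvLevS V (P ++ ((m - 1) :: (Q ++ (1 :: R)))) ((d - 1) - pvF V (P ++ ((m - 1) :: (Q ++ (1 :: R)))), d - 1)).1 := by
  have hFW : pvF V (P ++ (m :: (Q ++ (0 :: R))))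
      = pvF V P + max (m - V) 0 + pvF V Q + max (0 - V) 0 + pvF V R := by
    rw [pvF_append, pvF_cons, pvF_append, pvF_cons]; ring
  have hFW' : pvF V (P ++ ((m - 1) :: (Q ++ (1 :: R))))
      = pvF V P + max (m - 1 - V) 0 + pvF V Q + max (1 - V) 0 + pvF V R := by
    rw [pvF_append, pvF_cons, pvF_append, pvF_cons]; ring
  have h0V : max (0 - V) 0 = 0 := by omega
  have h1V : max (1 - V) 0 = 0 := by omega
  set r : Int := d - pvF V (P ++ (m :: (Q ++ (0 :: R)))) with hrdef
  set r' : Int := (d - 1) - pvF V (P ++ ((m - 1) :: (Q ++ (1 :: R)))) with hr'def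
  rcases eq_or_lt_of_le hV1 with hV1' | hV2
  · -- CASE A : V = 1
    have hVeq : V = 1 := hV1'.symm
    subst hVeq
    have hmm : max (m - 1) 0 = m - 1 := by omega
    have hmm' : max (m - 1 - 1) 0 = m - 2 := by omega
    have hr0 : r = 0 := by have := hr1 rfl; omega
    have hr'0 : r' = 0 := by
      rw [hr'def, hFW', h1V, hmm']
      rw [hrdef, hFW, h0V, hmm] at hr0
      omega
    rw [hr0, hr'0]
    rw [pvLevS_append 1 P (m :: (Q ++ (0 :: R))) (0, d)]
    rw [pvLevS_append 1 P ((m - 1) :: (Q ++ (1 :: R))) (0, d - 1)]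
    rw [pvLevS_nozero 1 P hP0 0 d, pvLevS_nozero 1 P hP0 0 (d - 1)]
    dsimp only
    have hrP : (pvLevS 1 P (0, 0)).2.1 = 0 := by
      have := pvLevS_r_bounds 1 P 0 0 le_rfl; omega
    rw [hrP]
    rw [pvLevS_cons_ge_zero (Q ++ (0 :: R)) (by omega) (by omega)]
    rw [pvLevS_cons_ge_zero (Q ++ (1 :: R)) (by omega) (by omega)]
    dsimp only
    congr 2
    rw [pvLevS_append 1 Q (0 :: R) (0, d), pvLevS_append 1 Q (1 :: R) (0, d - 1)]
    rw [pvLevS_nozero 1 Q hQ0 0 d, pvLevS_nozero 1 Q hQ0 0 (d - 1)]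
    dsimp only
    congr 1
    have hrQ : (pvLevS 1 Q (0, 0)).2.1 = 0 := by
      have := pvLevS_r_bounds 1 Q 0 0 le_rfl; omega
    rw [hrQ]
    rw [pvLevS_cons_zero R (by omega) rfl hd]
    rw [pvLevS_cons_ge_zero R (by omega) (by omega)]
  · rcases lt_or_eq_of_le hVm with hVlt | hVeq
    · -- CASE B : 2 ≤ V ≤ m - 1
      have hmV : max (m - V) 0 = m - V := by omega
      have hmV' : max (m - 1 - V) 0 = m - 1 - V := by omega
      have hr'r : r' = r := by
        rw [hr'def, hFW', h1V, hmV', hrdef, hFW, h0V, hmV]; ring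
      rw [hr'r]
      have tail : ∀ rr : Int, (pvLevS V (Q ++ (0 :: R)) (rr, d)).1
          = (pvLevS V (Q ++ (1 :: R)) (rr, d - 1)).1 := by
        intro rr
        rw [pvLevS_append V Q (0 :: R) (rr, d), pvLevS_append V Q (1 :: R) (rr, d - 1)]
        rw [pvLevS_nozero V Q hQ0 rr d, pvLevS_nozero V Q hQ0 rr (d - 1)]
        dsimp only
        congr 1
        rw [pvLevS_cons_zero R (by omega) rfl hd]
        rw [pvLevS_cons_plain R (by omega) (by omega)]
      rw [pvLevS_append V P (m :: (Q ++ (0 :: R))) (r, d)]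
      rw [pvLevS_append V P ((m - 1) :: (Q ++ (1 :: R))) (r, d - 1)]
      rw [pvLevS_nozero V P hP0 r d, pvLevS_nozero V P hP0 r (d - 1)]
      dsimp only
      by_cases h0r : 0 < (pvLevS V P (r, 0)).2.1
      · rw [pvLevS_cons_ge_pos (Q ++ (0 :: R)) (by omega) h0r]
        rw [pvLevS_cons_ge_pos (Q ++ (1 :: R)) (by omega) h0r]
        dsimp only
        congr 2
        exact tail _
      · rw [pvLevS_cons_ge_zero (Q ++ (0 :: R)) (by omega) h0r]
        rw [pvLevS_cons_ge_zero (Q ++ (1 :: R)) (by omega) h0r]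
        dsimp only
        congr 2
        exact tail _
    · -- CASE C : V = m
      subst hVeq
      have hFP : pvF V P = 0 := pvF_eq_zero (fun y hy => le_of_lt (hPm y hy))
      have hFQ : pvF V Q = 0 := pvF_eq_zero hQm
      have hFR : pvF V R = 0 := pvF_eq_zero hRm
      have hmx : max (V - V) 0 = 0 := by omega
      have hmx' : max (V - 1 - V) 0 = 0 := by omega
      have hrd : r = d := by rw [hrdef, hFW, h0V, hFP, hFQ, hFR, hmx]; ring
      have hr'd : r' = d - 1 := by rw [hr'def, hFW', h1V, hFP, hFQ, hFR, hmx']; ring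
      rw [pvLevS_append V P (V :: (Q ++ (0 :: R))) (r, d)]
      rw [pvLevS_append V P ((V - 1) :: (Q ++ (1 :: R))) (r', d - 1)]
      rw [pvLevS_plain V P (fun y hy => ⟨hPm y hy, hP0 y hy⟩) (r, d),
          pvLevS_plain V P (fun y hy => ⟨hPm y hy, hP0 y hy⟩) (r', d - 1)]
      dsimp only
      rw [pvLevS_cons_ge_pos (Q ++ (0 :: R)) (by omega) (by omega)]
      rw [pvLevS_cons_plain (Q ++ (1 :: R)) (by omega) (by omega)]
      dsimp only
      congr 2
      rw [show r - 1 = r' by omega]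
      rw [pvLevS_append V Q (0 :: R) (r', d), pvLevS_append V Q (1 :: R) (r', d - 1)]
      rw [pvLevS_nozero V Q hQ0 r' d, pvLevS_nozero V Q hQ0 r' (d - 1)]
      dsimp only
      congr 1
      rw [pvLevS_cons_zero R (by omega) rfl hd]
      rw [pvLevS_cons_plain R (by omega) (by omega)]

theorem pvCand_le_iff {d L s j : Int} (hj : 0 < j) :
    (-(PySem.Int.floordiv (d - s) j) ≤ L) ↔ s - j * L ≤ d := by
  constructor
  · intro h
    have h2 : -L ≤ PySem.Int.floordiv (d - s) j := by omega
    have h3 := (PySem.Int.le_floordiv_iff_mul_le (a := d - s) (b := j) (q := -L) hj).1 h2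
    nlinarith [h3]
  · intro h
    have h3 : (-L) * j ≤ d - s := by nlinarith
    have h2 := (PySem.Int.le_floordiv_iff_mul_le (a := d - s) (b := j) (q := -L) hj).2 h3
    omega

theorem pvCand_gt {d U s j : Int} (hj : 0 < j)
    (h : U < -(PySem.Int.floordiv (d - s) j)) : d < s - j * U := by
  have h2 : PySem.Int.floordiv (d - s) j < -U := by omega
  have h3 := (PySem.Int.floordiv_lt_iff_lt_mul (a := d - s) (b := j) (q := -U) hj).1 h2
  nlinarith [h3]

theorem pvLoop_spec (d : Int) : ∀ (X : List Int) (j0 a lvl : Int), 0 < j0 → 1 ≤ lvl →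
    (1 ≤ ((PySem.List.enumerate X j0).foldl
        (fun st jv => (max st.1 (-(PySem.Int.floordiv (d - (st.2 + jv.2)) jv.1)), st.2 + jv.2)) (lvl, a)).1) ∧
    (lvl ≤ ((PySem.List.enumerate X j0).foldl
        (fun st jv => (max st.1 (-(PySem.Int.floordiv (d - (st.2 + jv.2)) jv.1)), st.2 + jv.2)) (lvl, a)).1) ∧
    (∀ k : Nat, 0 < k → k ≤ X.length →
      a + (X.take k).sum - (j0 + k - 1) * ((PySem.List.enumerate X j0).foldl
        (fun st jv => (max st.1 (-(PySem.Int.floordiv (d - (st.2 + jv.2)) jv.1)), st.2 + jv.2)) (lvl, a)).1 ≤ d) ∧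
    (((PySem.List.enumerate X j0).foldl
        (fun st jv => (max st.1 (-(PySem.Int.floordiv (d - (st.2 + jv.2)) jv.1)), st.2 + jv.2)) (lvl, a)).1 = lvl ∨
      ∃ k : Nat, 0 < k ∧ k ≤ X.length ∧
        ((PySem.List.enumerate X j0).foldl
        (fun st jv => (max st.1 (-(PySem.Int.floordiv (d - (st.2 + jv.2)) jv.1)), st.2 + jv.2)) (lvl, a)).1
          = -(PySem.Int.floordiv (d - (a + (X.take k).sum)) (j0 + k - 1))) := by
  intro X
  induction X with
  | nil =>
    intro j0 a lvl hj0 hlvl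
    rw [PySem.List.enumerate_nil]
    simp only [List.foldl_nil]
    refine ⟨hlvl, le_rfl, ?_, Or.inl ?_⟩
    · intro k hk hkl
      simp at hkl
      omega
    · exact trivial
  | cons x t ih =>
    intro j0 a lvl hj0 hlvl
    rw [PySem.List.enumerate_cons]
    simp only [List.foldl_cons]
    obtain ⟨ih1, ih2, ih3, ih4⟩ := ih (j0 + 1) (a + x)
      (max lvl (-(PySem.Int.floordiv (d - (a + x)) j0))) (by omega) (le_trans hlvl (le_max_left _ _))
    refine ⟨ih1, le_trans (le_max_left _ _) ih2, ?_, ?_⟩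
    · intro k hk hkl
      cases k with
      | zero => omega
      | succ k' =>
        cases Nat.eq_zero_or_pos k' with
        | inl h0 =>
          subst h0
          simp only [List.take_succ_cons, List.take_zero, List.sum_cons, List.sum_nil]
          have hc : -(PySem.Int.floordiv (d - (a + x)) j0)
              ≤ ((PySem.List.enumerate t (j0 + 1)).foldl
                (fun st jv => (max st.1 (-(PySem.Int.floordiv (d - (st.2 + jv.2)) jv.1)), st.2 + jv.2))
                (max lvl (-(PySem.Int.floordiv (d - (a + x)) j0)), a + x)).1 :=
            le_trans (le_max_right _ _) ih2
          have := (pvCand_le_iff (d := d) (s := a + x) hj0).1 hc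
          push_cast
          have heq : (j0 + 1 - 1) = j0 := by ring
          rw [heq]
          omega
        | inr hpos =>
          have := ih3 k' hpos (by simpa using hkl)
          simp only [List.take_succ_cons, List.sum_cons]
          push_cast at this ⊢
          have heq : (j0 + ((k' : Int) + 1) - 1) = (j0 + 1) + k' - 1 := by ring
          rw [heq]
          omega
    · rcases ih4 with heq | ⟨k, hk0, hkl, heq⟩
      · rcases max_choice lvl (-(PySem.Int.floordiv (d - (a + x)) j0)) with hmx | hmx
        · rw [heq, hmx]; exact Or.inl rfl
        · refine Or.inr ⟨1, by omega, by simp, ?_⟩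
          rw [heq, hmx]
          norm_num
      · refine Or.inr ⟨k + 1, by omega, by simpa using hkl, ?_⟩
        rw [heq]
        simp only [List.take_succ_cons, List.sum_cons]
        push_cast
        have h : (j0 + 1) + (k : Int) - 1 = j0 + ((k : Int) + 1) - 1 := by ring
        rw [h]
        ring_nf

theorem pvLevel_char (W : List Int) (d : Int) (hd : 0 < d) :
    pvChar W d (((PySem.List.enumerate (PySem.List.sorted W (fun x => x) true) 1).foldl
      (fun st jv => (max st.1 (-(PySem.Int.floordiv (d - (st.2 + jv.2)) jv.1)), st.2 + jv.2)) ((1:Int), (0:Int))).1) := by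
  set X := PySem.List.sorted W (fun x => x) true with hX
  have hperm : X.Perm W := PySem.List.sorted_perm W (fun x => x) true
  have hpair : X.Pairwise (fun a b => b ≤ a) := PySem.List.sorted_pairwise_rev W (fun x => x)
  obtain ⟨h1, h2, h3, h4⟩ := pvLoop_spec d X 1 0 1 one_pos le_rfl
  set L := ((PySem.List.enumerate X 1).foldl
      (fun st jv => (max st.1 (-(PySem.Int.floordiv (d - (st.2 + jv.2)) jv.1)), st.2 + jv.2)) ((1:Int), (0:Int))).1 with hL
  refine ⟨h1, ?_, ?_⟩
  · rw [← pvF_perm hperm L]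
    rw [pvF_sorted_exact L X hpair]
    set k := X.countP (fun w => decide (L < w)) with hk
    cases Nat.eq_zero_or_pos k with
    | inl h0 => rw [h0]; simp; omega
    | inr hpos =>
      have hkl : k ≤ X.length := List.countP_le_length
      have := h3 k hpos hkl
      have heq : (1 : Int) + k - 1 = k := by ring
      rw [heq] at this
      omega
  · intro U hU hUL
    rcases h4 with hLl | ⟨k, hk0, hkl, hLe⟩
    · omega
    · have heq : (1 : Int) + k - 1 = k := by ring
      rw [heq] at hLe
      have hgt := pvCand_gt (d := d) (U := U) (s := 0 + (X.take k).sum)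
        (j := k) (by exact_mod_cast hk0) (by omega)
      have hle := pvF_take_le U X k hkl
      rw [← pvF_perm hperm U]
      omega

theorem pvChar_unique {W : List Int} {d V1 V2 : Int}
    (h1 : pvChar W d V1) (h2 : pvChar W d V2) : V1 = V2 := by
  obtain ⟨h11, h12, h13⟩ := h1
  obtain ⟨h21, h22, h23⟩ := h2
  rcases lt_trichotomy V1 V2 with h | h | h
  · have := h23 V1 h11 h; omega
  · exact h
  · have := h13 V2 h21 h; omega

theorem pvChar_le_max {W : List Int} {d V m : Int} (hd : 0 < d)
    (hc : pvChar W d V) (hm : 1 ≤ m) (hmax : ∀ y ∈ W, y ≤ m) : V ≤ m := by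
  by_contra h
  have := hc.2.2 m hm (by omega)
  have := pvF_eq_zero hmax
  omega

def pvD (W : List Int) : Int := min ((W.count 0 : Int)) (pvF 1 W)

theorem pvSumFold (V : Int) (W : List Int) :
    W.foldl (fun acc w => if V < w then acc + (w - V) else acc) 0 = pvF V W := by
  have h1 : W.foldl (fun acc w => if V < w then acc + (w - V) else acc) 0
      = W.foldl (fun acc w => acc + (if V < w then w - V else 0)) 0 :=
    PySem.List.foldl_congr_mem W _ _ 0 (by intro acc x hx; split_ifs <;> simp)
  rw [h1, PySem.List.foldl_add]
  have h2 : ∀ w : Int, (if V < w then w - V else 0) = max (w - V) 0 := by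
    intro w; split_ifs <;> omega
  simp only [h2, pvF, zero_add]

theorem pvZerosFold (W : List Int) :
    W.foldl (fun acc w => if w == 0 then acc + 1 else acc) (0 : Int) = (W.count 0 : Int) := by
  rw [PySem.List.foldl_beq_add_one]
  simp

theorem pvOutFold (V : Int) : ∀ (X : List Int) (out : List Int) (r f : Int),
    X.foldl (fun st w =>
        if V ≤ w then
          if 0 < st.2.1 then (st.1 ++ [V - 1], st.2.1 - 1, st.2.2)
          else (st.1 ++ [V], st.2.1, st.2.2)
        else if w == 0 && decide (0 < st.2.2) then (st.1 ++ [(1:Int)], st.2.1, st.2.2 - 1)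
        else (st.1 ++ [w], st.2.1, st.2.2)) (out, r, f)
      = (out ++ (pvLevS V X (r, f)).1, (pvLevS V X (r, f)).2) := by
  intro X
  induction X with
  | nil => intro out r f; simp [pvLevS]
  | cons w t ih =>
    intro out r f
    simp only [List.foldl_cons]
    by_cases h1 : V ≤ w
    · by_cases h2 : 0 < r
      · rw [if_pos h1, if_pos h2, ih, pvLevS_cons_ge_pos t h1 h2]
        simp
      · rw [if_pos h1, if_neg h2, ih, pvLevS_cons_ge_zero t h1 h2]
        simp
    · by_cases h3 : w = 0 ∧ 0 < f
      · rw [if_neg h1]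
        rw [if_pos (by simp [h3.1]; exact h3.2)]
        rw [ih, pvLevS_cons_zero t h1 h3.1 h3.2]
        simp
      · rw [if_neg h1]
        rw [if_neg (by simpa using fun hw => by simpa [hw] using h3 ∘ (And.intro hw))]
        rw [ih, pvLevS_cons_plain t h1 h3]
        simp

theorem pvBReb_nonpos (W : List Int) (h : pvD W ≤ 0) : pvBRebalance W = W := by
  simp only [pvBRebalance, pvZerosFold, pvSumFold]
  rw [if_pos (by unfold pvD at h; exact h)]

theorem pvBReb_pos (W : List Int) (h : 0 < pvD W) :
    ∃ V, pvChar W (pvD W) V ∧ pvBRebalance W = (pvLevS V W (pvD W - pvF V W, pvD W)).1 := by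
  refine ⟨_, pvLevel_char W (pvD W) h, ?_⟩
  simp only [pvBRebalance, pvZerosFold, pvSumFold]
  rw [if_neg (by unfold pvD at h; omega)]
  rw [pvOutFold]
  simp [pvD]

theorem pvF_set (U : Int) : ∀ (W : List Int) (i : Nat) (a : Int), i < W.length →
    pvF U (W.set i a) = pvF U W - max (W.getD i 0 - U) 0 + max (a - U) 0 := by
  intro W
  induction W with
  | nil => intro i a h; simp at h
  | cons w t ih =>
    intro i a h
    cases i with
    | zero => simp only [List.set_cons_zero, pvF_cons, List.getD_cons_zero]; ring
    | succ j =>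
      simp only [List.set_cons_succ, pvF_cons, List.getD_cons_succ]
      rw [ih j a (by simpa using h)]
      ring

theorem pvF_step {W : List Int} {s l : Nat} {m : Int} (hf : pvStepFacts W s l m)
    (U : Int) (hU : 1 ≤ U) :
    pvF U (pvStepW W s l) = pvF U W - (if U ≤ m - 1 then 1 else 0) := by
  obtain ⟨hs, hl, hWs, hWl, hm2, -, -, -⟩ := hf
  have hsne : s ≠ l := by intro hc; rw [hc, hWl] at hWs; omega
  unfold pvStepW
  rw [pvF_set U _ s 1 (by simpa using hs)]
  rw [pvF_set U W l _ hl]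
  have hget : (W.set l (W.getD l 0 - 1)).getD s 0 = 0 := by
    rw [List.getD_eq_getElem _ _ (by simpa using hs), List.getElem_set_ne (by omega)]
    rw [List.getD_eq_getElem _ _ hs] at hWs
    exact hWs
  rw [hget, hWl]
  have h1 : max (0 - U) 0 = 0 := by omega
  have h2 : max (1 - U) 0 = 0 := by omega
  rw [h1, h2]
  by_cases hUm : U ≤ m - 1
  · rw [if_pos hUm]
    have h3 : max (m - U) 0 = m - U := by omega
    have h4 : max (m - 1 - U) 0 = m - 1 - U := by omega
    rw [h3, h4]; ring
  · rw [if_neg hUm]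
    have h3 : max (m - U) 0 = 0 := by omega
    have h4 : max (m - 1 - U) 0 = 0 := by omega
    rw [h3, h4]; ring

theorem pvCount_eq_pvZC (W : List Int) : W.count 0 = W.countP (fun w => w == 0) := rfl

theorem pvZC_step' {W : List Int} {s l : Nat} {m : Int} (h : pvStepFacts W s l m) :
    (pvStepW W s l).countP (fun w => w == 0) + 1 = W.countP (fun w => w == 0) := by
  have := pvZC_step h
  unfold pvZC at this
  exact this

theorem pvD_step {W : List Int} {s l : Nat} {m : Int} (hf : pvStepFacts W s l m) :
    pvD (pvStepW W s l) = pvD W - 1 := by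
  have hc := pvZC_step' hf
  have hFs := pvF_step hf 1 le_rfl
  have hm2 : 2 ≤ m := hf.2.2.2.2.1
  rw [if_pos (by omega)] at hFs
  unfold pvD
  rw [pvCount_eq_pvZC, pvCount_eq_pvZC, hFs]
  omega

theorem pvCharStep {W : List Int} {s l : Nat} {m d V : Int} (hf : pvStepFacts W s l m)
    (hd : 0 < d) (hc : pvChar W d V) : pvChar (pvStepW W s l) (d - 1) V := by
  have hm2 : 2 ≤ m := hf.2.2.2.2.1
  have hVm : V ≤ m := pvChar_le_max hd hc (by omega) hf.2.2.2.2.2.2.2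
  obtain ⟨hV1, hF, hmin⟩ := hc
  refine ⟨hV1, ?_, ?_⟩
  · rw [pvF_step hf V hV1]
    by_cases hVm' : V ≤ m - 1
    · rw [if_pos hVm']; omega
    · rw [if_neg hVm']
      have hVeq : V = m := by omega
      have : pvF V W = 0 := pvF_eq_zero (by rw [hVeq]; exact hf.2.2.2.2.2.2.2)
      omega
  · intro U hU hUV
    rw [pvF_step hf U hU]
    by_cases hUm : U ≤ m - 1
    · rw [if_pos hUm]
      have := hmin U hU hUV
      omega
    · omega

theorem pvSet_at_append : ∀ (A : List Int) (x v : Int) (B : List Int),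
    (A ++ x :: B).set A.length v = A ++ v :: B := by
  intro A
  induction A with
  | nil => intro x v B; simp
  | cons a t ih => intro x v B; simp [List.set_cons_succ, ih]

theorem pvSplit2 (W : List Int) (i j : Nat) (hij : i < j) (hjW : j < W.length)
    (hiW : i < W.length) :
    W = W.take i ++ ((W[i]'hiW) :: (((W.drop (i+1)).take (j - i - 1)) ++ ((W[j]'hjW) :: W.drop (j+1)))) := by
  conv_lhs => rw [← List.take_append_drop i W]
  congr 1
  rw [List.drop_eq_getElem_cons hiW]
  congr 1
  conv_lhs => rw [← List.take_append_drop (j - i - 1) (W.drop (i+1))]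
  congr 1
  rw [List.drop_drop, show (i+1) + (j-i-1) = j from by omega]
  exact List.drop_eq_getElem_cons hjW

theorem pvSet_at_append' (A : List Int) (x v : Int) (B : List Int) (n : Nat) (h : A.length = n) :
    (A ++ x :: B).set n v = A ++ v :: B := by subst h; exact pvSet_at_append A x v B

theorem pvGetD_at_append (A : List Int) (x : Int) (B : List Int) (n : Nat) (h : A.length = n) :
    (A ++ x :: B).getD n 0 = x := by
  subst h
  rw [List.getD_eq_getElem _ _ (by simp), List.getElem_append_right (le_refl _)]
  simp

theorem pvMainStep {W : List Int} {s l : Nat} {m : Int} (hf : pvStepFacts W s l m)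
    (hd : 0 < pvD W) : pvBRebalance W = pvBRebalance (pvStepW W s l) := by
  obtain ⟨hs, hl, hWs, hWl, hm2, hzb, hmb, hall⟩ := hf
  obtain ⟨V, hchar, hbw⟩ := pvBReb_pos W hd
  have hV1 : 1 ≤ V := hchar.1
  have hVm : V ≤ m := pvChar_le_max hd hchar (by omega) hall
  have hF : pvF V W ≤ pvD W := hchar.2.1
  have hd1 : pvD W ≤ pvF 1 W := min_le_right _ _
  have hsne : s ≠ l := by intro hc; rw [hc, hWl] at hWs; omega
  have hdw' : pvD (pvStepW W s l) = pvD W - 1 :=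
    pvD_step ⟨hs, hl, hWs, hWl, hm2, hzb, hmb, hall⟩
  have hWsE : W[s]'hs = 0 := by rw [← List.getD_eq_getElem _ _ hs]; exact hWs
  have hWlE : W[l]'hl = m := by rw [← List.getD_eq_getElem _ _ hl]; exact hWl
  -- the key equality, undecomposed
  have key : (pvLevS V W (pvD W - pvF V W, pvD W)).1
      = (pvLevS V (pvStepW W s l) ((pvD W - 1) - pvF V (pvStepW W s l), pvD W - 1)).1 := by
    rcases Nat.lt_or_ge s l with hsl | hls
    · -- s < l
      have hdec := pvSplit2 W s l hsl hl hs
      rw [hWsE, hWlE] at hdec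
      have hlenP : (W.take s).length = s := by simp; omega
      have hlenQ : ((W.drop (s+1)).take (l - s - 1)).length = l - s - 1 := by simp; omega
      have hlenA : (W.take s ++ 0 :: ((W.drop (s+1)).take (l - s - 1))).length = l := by
        simp; omega
      have hstep : pvStepW W s l
          = W.take s ++ (1 :: (((W.drop (s+1)).take (l - s - 1)) ++ ((m - 1) :: W.drop (l+1)))) := by
        unfold pvStepW
        conv_lhs => rw [hdec]
        rw [show W.take s ++ (0 :: (((W.drop (s+1)).take (l - s - 1)) ++ ((m) :: W.drop (l+1))))
            = (W.take s ++ 0 :: ((W.drop (s+1)).take (l - s - 1))) ++ (m :: W.drop (l+1)) by simp]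
        rw [pvGetD_at_append _ _ _ _ hlenA]
        rw [pvSet_at_append' _ _ _ _ _ hlenA]
        rw [show (W.take s ++ 0 :: ((W.drop (s+1)).take (l - s - 1))) ++ (m - 1) :: W.drop (l+1)
            = W.take s ++ 0 :: (((W.drop (s+1)).take (l - s - 1)) ++ (m - 1) :: W.drop (l+1)) by simp]
        rw [pvSet_at_append' _ _ _ _ _ hlenP]
      have hP0 : ∀ y ∈ W.take s, y ≠ 0 := by
        intro y hy
        obtain ⟨k, hk, rfl⟩ := List.mem_take_iff_getElem.1 hy
        have : W.getD k 0 ≠ 0 := hzb k (by omega)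
        rwa [List.getD_eq_getElem _ _ (by omega)] at this
      have hPm : ∀ y ∈ W.take s, y < m := by
        intro y hy
        obtain ⟨k, hk, rfl⟩ := List.mem_take_iff_getElem.1 hy
        have : W.getD k 0 < m := hmb k (by omega)
        rwa [List.getD_eq_getElem _ _ (by omega)] at this
      have hQm : ∀ y ∈ (W.drop (s+1)).take (l - s - 1), y < m := by
        intro y hy
        obtain ⟨k, hk, rfl⟩ := List.mem_take_iff_getElem.1 hy
        rw [List.getElem_drop]
        have hkl : s + 1 + k < l := by
          have := hk; simp at this; omega
        have : W.getD (s+1+k) 0 < m := hmb _ hkl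
        rwa [List.getD_eq_getElem _ _ (by omega)] at this
      have hRm : ∀ y ∈ W.drop (l+1), y ≤ m := fun y hy => hall y (List.drop_subset _ _ hy)
      have hkey := pvKey_sl (W.take s) ((W.drop (s+1)).take (l - s - 1)) (W.drop (l+1))
        m (pvD W) V hm2 hV1 hVm hd (by rw [← hdec]; exact hF) (by rw [← hdec]; intro h; exact hd1)
        hP0 hPm hQm hRm
      rw [← hdec] at hkey
      rw [← hstep] at hkey
      exact hkey
    · -- l < s
      have hls' : l < s := by omega
      have hdec := pvSplit2 W l s hls' hs hl
      rw [hWsE, hWlE] at hdec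
      have hlenP : (W.take l).length = l := by simp; omega
      have hlenQ : ((W.drop (l+1)).take (s - l - 1)).length = s - l - 1 := by simp; omega
      have hlenA : (W.take l ++ (m - 1) :: ((W.drop (l+1)).take (s - l - 1))).length = s := by
        simp; omega
      have hstep : pvStepW W s l
          = W.take l ++ ((m - 1) :: (((W.drop (l+1)).take (s - l - 1)) ++ ((1:Int) :: W.drop (s+1)))) := by
        unfold pvStepW
        conv_lhs => rw [hdec]
        rw [pvGetD_at_append _ _ _ _ hlenP]
        rw [pvSet_at_append' _ _ _ _ _ hlenP]
        rw [show W.take l ++ (m - 1) :: (((W.drop (l+1)).take (s - l - 1)) ++ (0 :: W.drop (s+1)))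
            = (W.take l ++ (m - 1) :: ((W.drop (l+1)).take (s - l - 1))) ++ (0 :: W.drop (s+1)) by simp]
        rw [pvSet_at_append' _ _ _ _ _ hlenA]
        simp
      have hP0 : ∀ y ∈ W.take l, y ≠ 0 := by
        intro y hy
        obtain ⟨k, hk, rfl⟩ := List.mem_take_iff_getElem.1 hy
        have : W.getD k 0 ≠ 0 := hzb k (by omega)
        rwa [List.getD_eq_getElem _ _ (by omega)] at this
      have hPm : ∀ y ∈ W.take l, y < m := by
        intro y hy
        obtain ⟨k, hk, rfl⟩ := List.mem_take_iff_getElem.1 hy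
        have : W.getD k 0 < m := hmb k (by omega)
        rwa [List.getD_eq_getElem _ _ (by omega)] at this
      have hQ0 : ∀ y ∈ (W.drop (l+1)).take (s - l - 1), y ≠ 0 := by
        intro y hy
        obtain ⟨k, hk, rfl⟩ := List.mem_take_iff_getElem.1 hy
        rw [List.getElem_drop]
        have hkl : l + 1 + k < s := by
          have := hk; simp at this; omega
        have : W.getD (l+1+k) 0 ≠ 0 := hzb _ hkl
        rwa [List.getD_eq_getElem _ _ (by omega)] at this
      have hQm : ∀ y ∈ (W.drop (l+1)).take (s - l - 1), y ≤ m := fun y hy =>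
        hall y (List.drop_subset _ _ (List.take_subset _ _ hy))
      have hRm : ∀ y ∈ W.drop (s+1), y ≤ m := fun y hy => hall y (List.drop_subset _ _ hy)
      have hkey := pvKey_ls (W.take l) ((W.drop (l+1)).take (s - l - 1)) (W.drop (s+1))
        m (pvD W) V hm2 hV1 hVm hd (by rw [← hdec]; exact hF) (by rw [← hdec]; intro h; exact hd1)
        hP0 hPm hQ0 hQm hRm
      rw [← hdec] at hkey
      rw [← hstep] at hkey
      exact hkey
  -- conclude
  by_cases hpos : 0 < pvD (pvStepW W s l)
  · obtain ⟨V', hchar', hbw'⟩ := pvBReb_pos (pvStepW W s l) hpos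
    have hcs : pvChar (pvStepW W s l) (pvD (pvStepW W s l)) V := by
      rw [hdw']
      exact pvCharStep ⟨hs, hl, hWs, hWl, hm2, hzb, hmb, hall⟩ hd hchar
    have hVV : V' = V := pvChar_unique hchar' hcs
    subst hVV
    rw [hbw, hbw', hdw']
    exact key
  · have hb' := pvBReb_nonpos (pvStepW W s l) (by omega)
    rw [hbw, hb', key]
    have hd1' : pvD W = 1 := by omega
    have hcs : pvChar (pvStepW W s l) 0 V := by
      have := pvCharStep ⟨hs, hl, hWs, hWl, hm2, hzb, hmb, hall⟩ hd hchar
      rwa [hd1'] at this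
    have hF0 : pvF V (pvStepW W s l) = 0 :=
      le_antisymm hcs.2.1 (pvF_nonneg _ _)
    rw [hd1', hF0]
    norm_num
    exact pvLevS_id V _ (pvF_le_zero (by omega))

theorem pvCond_pos {W : List Int} (h1 : (W.any (fun w => w == 0)) = true)
    (h2 : (W.any (fun w => decide (1 < w))) = true) : 0 < pvD W := by
  have hz : (0 : Int) ∈ W := by
    obtain ⟨w, hw, he⟩ := List.any_eq_true.1 h1
    have : w = 0 := by simpa using he
    exact this ▸ hw
  have hcount : 0 < W.count 0 := List.count_pos_iff.2 hz
  have hex : ∃ w ∈ W, 1 < w := by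
    obtain ⟨w, hw, he⟩ := List.any_eq_true.1 h2
    exact ⟨w, hw, by simpa using he⟩
  have hfpos : 0 < pvF 1 W := by
    by_cases h : 0 < pvF 1 W
    · exact h
    · obtain ⟨w, hw, hw1⟩ := hex
      have := pvF_le_zero (V := 1) (W := W) (by omega) w hw
      omega
  have hci : (0 : Int) < (W.count 0 : Int) := by exact_mod_cast hcount
  unfold pvD
  omega

theorem pvCond_neg {W : List Int}
    (h : ¬ ((W.any (fun w => w == 0)) = true ∧ (W.any (fun w => decide (1 < w))) = true)) :
    pvD W ≤ 0 := by
  unfold pvD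
  rcases not_and_or.1 h with h1 | h2
  · have hz : (0 : Int) ∉ W := by
      intro hz
      exact h1 (List.any_eq_true.2 ⟨0, hz, by simp⟩)
    have : W.count 0 = 0 := List.count_eq_zero.2 hz
    omega
  · have hle : ∀ w ∈ W, w ≤ 1 := by
      intro w hw
      by_contra hgt
      exact h2 (List.any_eq_true.2 ⟨w, hw, by simpa using by omega⟩)
    have := pvF_eq_zero hle
    omega

theorem pvMainAux : ∀ (n : Nat) (W : List Int), pvZC W ≤ n → pvFixLoopA W = pvBRebalance W := by
  intro n
  induction n with
  | zero =>
    intro W hn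
    have hnz : ¬ (W.any (fun w => w == 0)) = true := by
      intro hc
      obtain ⟨w, hw, he⟩ := List.any_eq_true.1 hc
      have : 0 < pvZC W := by
        unfold pvZC
        exact List.countP_pos_iff.2 ⟨w, hw, he⟩
      omega
    rw [pvFixLoopA, dif_neg (fun hc => hnz hc.1)]
    exact (pvBReb_nonpos W (pvCond_neg (fun hc => hnz hc.1))).symm
  | succ n ih =>
    intro W hn
    rw [pvFixLoopA]
    by_cases hc : (W.any (fun w => w == 0)) = true ∧ (W.any (fun w => decide (1 < w))) = true
    · rw [dif_pos hc]
      split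
      next heq =>
        exfalso
        have : (PySem.List.index? W 0).isSome = true := by
          rw [PySem.List.index?_isSome_iff]
          obtain ⟨w, hw, he⟩ := List.any_eq_true.1 hc.1
          have : w = 0 := by simpa using he
          exact this ▸ hw
        rw [heq] at this
        simp at this
      next smallest heq =>
        split
        next heq2 =>
          exfalso
          have hnil := (PySem.List.max?_eq_none_iff _ _).1 heq2
          have hne : W ≠ [] := by
            intro hW
            rw [hW] at heq
            simp [PySem.List.index?] at heq
          have hlen : 0 < W.length := List.length_pos_iff.2 hne
          have hlen2 := congrArg List.length hnil
          rw [PySem.List.length_pyRange_one] at hlen2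
          simp only [List.length_nil] at hlen2
          omega
        next largest heq2 =>
          obtain ⟨lN, rfl, hfacts, hexpr⟩ := pvStepA_extract W smallest largest hc.1 hc.2 heq heq2
          rw [hexpr]
          have hzc := pvZC_step hfacts
          rw [ih (pvStepW W smallest lN) (by omega)]
          exact (pvMainStep hfacts (pvCond_pos hc.1 hc.2)).symm
    · rw [dif_neg hc]
      exact (pvBReb_nonpos W (pvCond_neg hc)).symm

theorem pvMainEq (W : List Int) : pvFixLoopA W = pvBRebalance W :=
  pvMainAux (pvZC W) W le_rfl

-- ===== VERDICT (by name: the statement is the Claim_ definition above) =====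
theorem weighted_widths_spec : Claim_equal_weighted_widths := by
  intro tw ws _
  unfold Spec_weighted_widths weighted_widths weighted_widths_alt
  by_cases h1 : tw ≤ 0
  · simp only [if_pos h1]
  · simp only [if_neg h1]
    by_cases h2 : ws.sum ≤ 0
    · simp only [if_pos h2]
    · simp only [if_neg h2]
      exact pvMainEq _
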